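-- pv_equiv track=rewrite | github.com/norbert-peters/PDVM_SYSTEM_WEB | backend/tools/phase2_apply_metadata_catalog.py | _extract_prefix
-- ===== SOURCE A (Python) =====
-- TARGET_PREFIXES = ("asy_", "sys_", "dev_", "msy_", "tst_")
--
-- def _extract_prefix(table_name: str) -> str:
--     name = str(table_name).lower().strip()
--     for prefix in TARGET_PREFIXES:
--         if name.startswith(prefix):
--             return prefix
--     if "_" in name:
--         return name.split("_", 1)[0] + "_"
--     return "<none>"
-- ===== SOURCE B (Python) =====
-- TARGET_PREFIXES = ("asy_", "sys_", "dev_", "msy_", "tst_")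
--
-- def _extract_prefix(table_name: str) -> str:
--     # Every target prefix is a three-letter head plus underscore, so the scan over TARGET_PREFIXES
--     # is redundant: the answer is always the segment before the first underscore.
--     name = str(table_name).lower().strip()
--     head, sep, _tail = name.partition("_")
--     return head + "_" if sep else "<none>"
-- ===== Notes on version B (the rewrite author's own statement) =====
-- stated objective: simpler
-- what changed: Dropped the scan over TARGET_PREFIXES entirely (every target is a three-letter head plus underscore, so the generic split rule subsumes it) and replaced the two-step split with a single partition at the first underscore; B is a 3-line straight-line function.
import Mathlib
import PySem

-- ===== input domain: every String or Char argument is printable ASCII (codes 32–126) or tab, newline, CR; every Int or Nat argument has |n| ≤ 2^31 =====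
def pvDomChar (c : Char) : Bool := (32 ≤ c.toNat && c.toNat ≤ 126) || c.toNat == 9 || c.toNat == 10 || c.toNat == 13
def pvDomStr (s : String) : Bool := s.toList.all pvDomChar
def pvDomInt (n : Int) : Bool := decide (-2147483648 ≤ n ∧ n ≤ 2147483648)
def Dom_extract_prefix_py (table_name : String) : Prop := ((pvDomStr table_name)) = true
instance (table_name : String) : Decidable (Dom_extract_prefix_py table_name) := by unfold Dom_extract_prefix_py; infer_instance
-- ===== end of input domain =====

-- B drops the scan over TARGET_PREFIXES (each target is head+'_', so the generic
-- split rule subsumes it) and uses a single partition at the first underscore: simpler.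

-- ===== PORT A =====
def extract_prefix_py (table_name : String) : String :=
  let name := PySem.Str.strip (PySem.Str.lower table_name)
  if PySem.Str.startswith name "asy_" then "asy_"
  else if PySem.Str.startswith name "sys_" then "sys_"
  else if PySem.Str.startswith name "dev_" then "dev_"
  else if PySem.Str.startswith name "msy_" then "msy_"
  else if PySem.Str.startswith name "tst_" then "tst_"
  else if PySem.Str.isIn "_" name then
    match PySem.Str.splitMax? name "_" 1 with
    | some (p :: _) => String.ofList (p.toList ++ ['_'])   -- p + "_"
    | _ => "<none>"   -- unreachable: the separator "_" is nonempty, so split returns a nonempty list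
  else "<none>"

-- ===== PORT B =====
-- name.partition("_"): chars before the first '_', and whether '_' occurs
def pvPartHead : List Char → List Char × Bool
  | [] => ([], false)
  | c :: rest => if c = '_' then ([], true)
      else
        let r := pvPartHead rest
        (c :: r.1, r.2)

def extract_prefix_py_alt (table_name : String) : String :=
  let name := PySem.Str.strip (PySem.Str.lower table_name)
  let r := pvPartHead name.toList
  if r.2 then String.ofList (r.1 ++ ['_']) else "<none>"

-- ===== PRECONDITION & SPEC =====
def Spec_extract_prefix_py (table_name : String) (out : String) : Prop := out = extract_prefix_py_alt table_name
instance (table_name : String) (out : String) : Decidable (Spec_extract_prefix_py table_name out) := by unfold Spec_extract_prefix_py; infer_instance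

-- ===== CLAIM (what is proved, stated in full; the proofs are below) =====
def Claim_equal_extract_prefix_py : Prop := ∀ (table_name : String), Dom_extract_prefix_py table_name → Spec_extract_prefix_py table_name (extract_prefix_py table_name)

-- ===== LEMMAS AND PROOFS =====

-- splitOnMax.go with maxsplit budget 0 ignores its fuel and flushes
lemma pv_go_zero (sep : List Char) (fuel : Nat) (l cur : List Char) (acc : List (List Char)) :
    PySem.Chars.splitOnMax.go sep fuel 0 l cur acc = ((cur.reverse ++ l) :: acc).reverse := by
  cases fuel <;> cases l <;> simp [PySem.Chars.splitOnMax.go]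

-- one-split split on '_', characterised through pvPartHead
lemma pv_go_one (l : List Char) : ∀ (fuel : Nat) (cur : List Char), l.length < fuel →
    PySem.Chars.splitOnMax.go ['_'] fuel 1 l cur [] =
      (if (pvPartHead l).2 then [cur.reverse ++ (pvPartHead l).1, l.drop ((pvPartHead l).1.length + 1)]
       else [cur.reverse ++ l]) := by
  induction l with
  | nil =>
      intro fuel cur h
      cases fuel
      · omega
      · simp [PySem.Chars.splitOnMax.go, pvPartHead]
  | cons c rest ih =>
      intro fuel cur h
      cases fuel with
      | zero => omega
      | succ f =>
        by_cases hc : c = '_'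
        · subst hc
          simp only [PySem.Chars.splitOnMax.go, pvPartHead]
          simp [List.isPrefixOf, pv_go_zero]
        · have hstep : PySem.Chars.splitOnMax.go ['_'] (f+1) 1 (c :: rest) cur [] =
              PySem.Chars.splitOnMax.go ['_'] f 1 rest (c :: cur) [] := by
            simp [PySem.Chars.splitOnMax.go, List.isPrefixOf, Ne.symm hc]
          rw [hstep, ih f (c :: cur) (by simpa using Nat.lt_of_succ_lt_succ h)]
          simp [pvPartHead, hc]

lemma pv_partHead_append (p t : List Char) (hp : '_' ∉ p) :
    pvPartHead (p ++ '_' :: t) = (p, true) := by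
  induction p with
  | nil => simp [pvPartHead]
  | cons c q ih =>
      have hc : c ≠ '_' := by simp at hp; exact Ne.symm hp.1
      have hq : '_' ∉ q := by simp at hp; exact hp.2
      simp [pvPartHead, hc, ih hq]

lemma pv_partHead_no (l : List Char) (hl : '_' ∉ l) : pvPartHead l = (l, false) := by
  induction l with
  | nil => simp [pvPartHead]
  | cons c q ih =>
      have hc : c ≠ '_' := by simp at hl; exact Ne.symm hl.1
      have hq : '_' ∉ q := by simp at hl; exact hl.2
      simp [pvPartHead, hc, ih hq]

lemma pv_first_split (l : List Char) (h : '_' ∈ l) :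
    ∃ p t, l = p ++ '_' :: t ∧ '_' ∉ p := by
  induction l with
  | nil => cases h
  | cons c q ih =>
      by_cases hc : c = '_'
      · exact ⟨[], q, by simp [hc], by simp⟩
      · have hq : '_' ∈ q := by cases h with
          | head => exact absurd rfl hc
          | tail _ h => exact h
        obtain ⟨p, t, hpt, hp⟩ := ih hq
        exact ⟨c :: p, t, by simp [hpt], by simp [hp, Ne.symm hc]⟩

-- the core equality, over an already-normalised string
lemma pv_core (name : String) :
    (if PySem.Str.startswith name "asy_" then "asy_"
     else if PySem.Str.startswith name "sys_" then "sys_"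
     else if PySem.Str.startswith name "dev_" then "dev_"
     else if PySem.Str.startswith name "msy_" then "msy_"
     else if PySem.Str.startswith name "tst_" then "tst_"
     else if PySem.Str.isIn "_" name then
       match PySem.Str.splitMax? name "_" 1 with
       | some (p :: _) => String.ofList (p.toList ++ ['_'])
       | _ => "<none>"
     else "<none>")
    = (let r := pvPartHead name.toList
       if r.2 then String.ofList (r.1 ++ ['_']) else "<none>") := by
  have hpref : ∀ (a b c : Char) (t : List Char), a ≠ '_' → b ≠ '_' → c ≠ '_' →
      name.toList = a :: b :: c :: '_' :: t →
      String.ofList ((pvPartHead name.toList).1 ++ ['_']) = String.ofList [a, b, c, '_'] ∧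
      (pvPartHead name.toList).2 = true := by
    intro a b c t ha hb hc h
    have hph : pvPartHead name.toList = ([a, b, c], true) := by
      rw [h]
      exact pv_partHead_append [a, b, c] t (by simp [Ne.symm ha, Ne.symm hb, Ne.symm hc])
    simp [hph]
  by_cases h1 : PySem.Chars.startswith name.toList ['a', 's', 'y', '_'] = true
  · obtain ⟨t, ht⟩ := (by simpa [PySem.Chars.startswith] using h1 : _ <+: name.toList)
    obtain ⟨he, hb⟩ := hpref 'a' 's' 'y' t (by decide) (by decide) (by decide) ht.symm
    simp [h1, hb, he]
  by_cases h2 : PySem.Chars.startswith name.toList ['s', 'y', 's', '_'] = true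
  · obtain ⟨t, ht⟩ := (by simpa [PySem.Chars.startswith] using h2 : _ <+: name.toList)
    obtain ⟨he, hb⟩ := hpref 's' 'y' 's' t (by decide) (by decide) (by decide) ht.symm
    simp [h1, h2, hb, he]
  by_cases h3 : PySem.Chars.startswith name.toList ['d', 'e', 'v', '_'] = true
  · obtain ⟨t, ht⟩ := (by simpa [PySem.Chars.startswith] using h3 : _ <+: name.toList)
    obtain ⟨he, hb⟩ := hpref 'd' 'e' 'v' t (by decide) (by decide) (by decide) ht.symm
    simp [h1, h2, h3, hb, he]
  by_cases h4 : PySem.Chars.startswith name.toList ['m', 's', 'y', '_'] = true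
  · obtain ⟨t, ht⟩ := (by simpa [PySem.Chars.startswith] using h4 : _ <+: name.toList)
    obtain ⟨he, hb⟩ := hpref 'm' 's' 'y' t (by decide) (by decide) (by decide) ht.symm
    simp [h1, h2, h3, h4, hb, he]
  by_cases h5 : PySem.Chars.startswith name.toList ['t', 's', 't', '_'] = true
  · obtain ⟨t, ht⟩ := (by simpa [PySem.Chars.startswith] using h5 : _ <+: name.toList)
    obtain ⟨he, hb⟩ := hpref 't' 's' 't' t (by decide) (by decide) (by decide) ht.symm
    simp [h1, h2, h3, h4, h5, hb, he]
  by_cases h6 : PySem.Chars.isIn ['_'] name.toList = true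
  · have hm : '_' ∈ name.toList := by
      have := (PySem.Chars.isIn_iff_infix ['_'] name.toList).mp h6
      exact (List.singleton_infix_iff '_' name.toList).mp this
    obtain ⟨p, t, hpt, hp⟩ := pv_first_split name.toList hm
    have hph : pvPartHead name.toList = (p, true) := by rw [hpt]; exact pv_partHead_append p t hp
    have hsplit : PySem.Chars.splitOnMax name.toList ['_'] 1 =
        [p, name.toList.drop (p.length + 1)] := by
      rw [PySem.Chars.splitOnMax]
      simp only [show ¬ ((1:Int) < 0) by decide, if_false]
      rw [show ((1:Int)).toNat = 1 from rfl]
      rw [pv_go_one name.toList (name.toList.length + 1) [] (by omega)]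
      simp [hph]
    have hsm : PySem.Str.splitMax? name "_" 1 =
        some (String.ofList p :: [String.ofList (name.toList.drop (p.length + 1))]) := by
      simp [PySem.Str.splitMax?, PySem.Chars.splitMax?, hsplit]
    simp [h1, h2, h3, h4, h5, h6, hph, hsm]
  · have hm : '_' ∉ name.toList := by
      intro hmem
      exact h6 ((PySem.Chars.isIn_iff_infix ['_'] name.toList).mpr
        ((List.singleton_infix_iff '_' name.toList).mpr hmem))
    have hph := pv_partHead_no name.toList hm
    simp [h1, h2, h3, h4, h5, h6, hph]

-- ===== VERDICT (by name: the statement is the Claim_ definition above) =====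
theorem extract_prefix_py_spec : Claim_equal_extract_prefix_py := by
  intro table_name _
  unfold Spec_extract_prefix_py extract_prefix_py extract_prefix_py_alt
  exact pv_core (PySem.Str.strip (PySem.Str.lower table_name))
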